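-- pv_equiv track=rewrite | github.com/magicYang1573/DynamicRTL | CDFG2RTL/src/utils/CDFG_utils.py | get_fanin_fanout
-- ===== SOURCE A (Python) =====
-- def fanin_list_is_valid(x_data, edge_index, edge_type_dict, fanin_list):
--     for idx, fanins in enumerate(fanin_list):
--         if len(fanins) > 0:
--             temp = edge_type_dict[(fanins[0], idx)]
--             for fanin in fanins:
--                 if temp <= edge_type_dict[(fanin, idx)]:
--                     temp = edge_type_dict[(fanin, idx)]
--                 else:
--                     return False
--     return True
--
-- def get_fanin_fanout(x_data, edge_index, edge_type):
--     """
--     The fanin_list, fanout_list type: list[list[int]]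
--     The fanin list of node idx, is fanin_list[idx]
--     The order of element in fanin_list[idx] is determined by the number of edge_type
--
--     example:
--     edge_index = [[1, 20], [1, 11], [1, 31]]
--     edge_type = [2, 3, 1]
--     fanin_list[1] = [31, 20, 11]
--     """
--     fanin_list = [[] for _ in range(len(x_data))]
--     fanout_list = [[] for _ in range(len(x_data))]
--
--     # collect elements in fanin_list and fanout_list
--     for edge in edge_index:
--         fanin_list[edge[1]].append(edge[0])
--         fanout_list[edge[0]].append(edge[1])
--
--     edge_type_dict = {(edge_index[id][0], edge_index[id][1]): edge_type[id] for id in range(len(edge_index))}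
--
--     # sort elements in fanin_list to obey the order of edge_type
--     for i in range(len(fanin_list)):
--         fanin_list[i] = sorted(fanin_list[i], key=lambda x: edge_type_dict[(x, i)])
--
--     assert fanin_list_is_valid(x_data, edge_index, edge_type_dict, fanin_list)
--
--     return fanin_list, fanout_list
-- ===== SOURCE B (Python) =====
-- def get_fanin_fanout(x_data, edge_index, edge_type):
--     n = len(x_data)
--     fanin_list = [[] for _ in range(n)]
--     fanout_list = [[] for _ in range(n)]
--     edge_type_dict = {(edge_index[i][0], edge_index[i][1]): edge_type[i] for i in range(len(edge_index))}
--     for edge in edge_index: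
--         fanout_list[edge[0]].append(edge[1])
--     # one globally stable-sorted pass replaces A's per-node sorts
--     for edge in sorted(edge_index, key=lambda e: edge_type_dict[(e[0], e[1])]):
--         fanin_list[edge[1]].append(edge[0])
--     return fanin_list, fanout_list
-- ===== Notes on version B (the rewrite author's own statement) =====
-- stated objective: alternative
-- what changed: Replaces A's per-node sorts of fanin lists by one global stable sort of edge_index keyed on edge_type_dict, then a single distribution pass appending sources into fanin_list; stability makes each node's fanin order coincide with A's per-node sort.
import Mathlib
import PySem

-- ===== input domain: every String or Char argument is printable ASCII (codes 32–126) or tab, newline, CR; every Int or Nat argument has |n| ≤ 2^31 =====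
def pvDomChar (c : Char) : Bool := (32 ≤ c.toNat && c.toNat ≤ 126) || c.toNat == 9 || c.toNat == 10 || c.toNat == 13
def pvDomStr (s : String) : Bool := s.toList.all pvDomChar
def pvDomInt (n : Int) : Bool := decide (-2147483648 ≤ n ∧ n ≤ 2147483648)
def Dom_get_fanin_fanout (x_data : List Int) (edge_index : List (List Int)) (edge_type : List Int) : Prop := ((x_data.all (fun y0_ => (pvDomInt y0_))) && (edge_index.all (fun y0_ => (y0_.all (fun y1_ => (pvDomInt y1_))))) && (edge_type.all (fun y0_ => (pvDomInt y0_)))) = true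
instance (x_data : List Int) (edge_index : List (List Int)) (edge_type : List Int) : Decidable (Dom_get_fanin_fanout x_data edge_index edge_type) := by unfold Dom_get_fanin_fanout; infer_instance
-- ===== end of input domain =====

-- B replaces A's per-node sorts of the fanin lists by ONE globally stable-sorted pass over the
-- edges (sorted by edge_type_dict) distributed into fanin_list; same cost class, different shape.

-- shared helper: Python 'xss[i].append(v)' on a list of lists (a negative index wraps, as in
-- Python; an out-of-range index leaves xss unchanged — those inputs are excluded by Pre_)
def pyAppendAt (xss : List (List Int)) (i : Int) (v : Int) : List (List Int) :=
  let j : Int := if i < 0 then i + xss.length else i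
  if 0 ≤ j ∧ j < (xss.length : Int) then xss.set j.toNat (xss.getD j.toNat [] ++ [v]) else xss

-- ===== PORT A =====
-- the final 'assert fanin_list_is_valid …' of A is not ported: each fanin_list[i] has just been
-- sorted by exactly the key the assert checks to be nondecreasing, so it always passes under Pre_
def get_fanin_fanout (x_data : List Int) (edge_index : List (List Int)) (edge_type : List Int) : List (List Int) × List (List Int) :=
  let fanin0 := List.replicate x_data.length ([] : List Int)
  let fanout0 := List.replicate x_data.length ([] : List Int)
  let p := edge_index.foldl (fun (p : List (List Int) × List (List Int)) e =>
      (pyAppendAt p.1 (PySem.List.pyGetD e 1 0) (PySem.List.pyGetD e 0 0),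
       pyAppendAt p.2 (PySem.List.pyGetD e 0 0) (PySem.List.pyGetD e 1 0))) (fanin0, fanout0)
  let etd : PySem.Dict (Int × Int) Int := (PySem.List.pyRange 0 edge_index.length 1).foldl
      (fun d id => d.insert (PySem.List.pyGetD (PySem.List.pyGetD edge_index id []) 0 0,
                             PySem.List.pyGetD (PySem.List.pyGetD edge_index id []) 1 0)
                            (PySem.List.pyGetD edge_type id 0)) PySem.Dict.empty
  let fanin2 := (List.range p.1.length).map (fun i =>
      PySem.List.sorted (p.1.getD i []) (fun x => etd.getD (x, (i : Int)) 0) false)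
  (fanin2, p.2)

-- ===== PORT B =====
def get_fanin_fanout_alt (x_data : List Int) (edge_index : List (List Int)) (edge_type : List Int) : List (List Int) × List (List Int) :=
  let fanin0 := List.replicate x_data.length ([] : List Int)
  let fanout0 := List.replicate x_data.length ([] : List Int)
  let etd : PySem.Dict (Int × Int) Int := (PySem.List.pyRange 0 edge_index.length 1).foldl
      (fun d id => d.insert (PySem.List.pyGetD (PySem.List.pyGetD edge_index id []) 0 0,
                             PySem.List.pyGetD (PySem.List.pyGetD edge_index id []) 1 0)
                            (PySem.List.pyGetD edge_type id 0)) PySem.Dict.empty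
  let fanout := edge_index.foldl (fun a e =>
      pyAppendAt a (PySem.List.pyGetD e 0 0) (PySem.List.pyGetD e 1 0)) fanout0
  let fanin := (PySem.List.sorted edge_index
      (fun e => etd.getD (PySem.List.pyGetD e 0 0, PySem.List.pyGetD e 1 0) 0) false).foldl
      (fun a e => pyAppendAt a (PySem.List.pyGetD e 1 0) (PySem.List.pyGetD e 0 0)) fanin0
  (fanin, fanout)

-- ===== PRECONDITION & SPEC =====
-- Pre_ excludes exactly the inputs on which A raises (IndexError: an edge shorter than 2, a
-- src/dst outside Python's index range, edge_type shorter than edge_index) together with the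
-- negative-dst corner: there A usually raises KeyError in its per-node sort, and in the rare
-- aliased case where it returns, A's fanin order (keyed on the wrapped index) and B's (keyed on
-- the raw dst) are both accidental artefacts of negative-index wraparound — see claim cites.
def Pre_get_fanin_fanout (x_data : List Int) (edge_index : List (List Int)) (edge_type : List Int) : Prop :=
  edge_index.length ≤ edge_type.length ∧
  ∀ e ∈ edge_index, 2 ≤ e.length ∧
    -(x_data.length : Int) ≤ PySem.List.pyGetD e 0 0 ∧ PySem.List.pyGetD e 0 0 < (x_data.length : Int) ∧
    0 ≤ PySem.List.pyGetD e 1 0 ∧ PySem.List.pyGetD e 1 0 < (x_data.length : Int)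
instance (x_data : List Int) (edge_index : List (List Int)) (edge_type : List Int) : Decidable (Pre_get_fanin_fanout x_data edge_index edge_type) := by unfold Pre_get_fanin_fanout; infer_instance

def pvWitness_get_fanin_fanout : List Int × List (List Int) × List Int :=
  ([0, 0], [[0, 1], [1, 1], [0, 0]], [2, 1, 3])

def Spec_get_fanin_fanout (x_data : List Int) (edge_index : List (List Int)) (edge_type : List Int) (out : List (List Int) × List (List Int)) : Prop := out = get_fanin_fanout_alt x_data edge_index edge_type
instance (x_data : List Int) (edge_index : List (List Int)) (edge_type : List Int) (out : List (List Int) × List (List Int)) : Decidable (Spec_get_fanin_fanout x_data edge_index edge_type out) := by unfold Spec_get_fanin_fanout; infer_instance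

-- ===== CLAIM (what is proved, stated in full; the proofs are below) =====
def Claim_equal_get_fanin_fanout : Prop := ∀ (x_data : List Int) (edge_index : List (List Int)) (edge_type : List Int), Dom_get_fanin_fanout x_data edge_index edge_type → Pre_get_fanin_fanout x_data edge_index edge_type → Spec_get_fanin_fanout x_data edge_index edge_type (get_fanin_fanout x_data edge_index edge_type)

-- ===== LEMMAS AND PROOFS =====

lemma length_pyAppendAt (xss : List (List Int)) (i v : Int) :
    (pyAppendAt xss i v).length = xss.length := by
  simp only [pyAppendAt]
  split_ifs <;> simp

lemma length_foldl_pyAppendAt (f g : List Int → Int) (l : List (List Int))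
    (acc : List (List Int)) :
    (l.foldl (fun a e => pyAppendAt a (f e) (g e)) acc).length = acc.length := by
  induction l generalizing acc with
  | nil => rfl
  | cons e l ih => simp [List.foldl_cons, ih, length_pyAppendAt]

-- characterization of the append-distribution loop (for in-range target indices)
lemma getD_foldl_pyAppendAt (f g : List Int → Int) (l : List (List Int))
    (acc : List (List Int)) (hf : ∀ e ∈ l, 0 ≤ f e ∧ f e < (acc.length : Int)) (i : Nat) :
    (l.foldl (fun a e => pyAppendAt a (f e) (g e)) acc).getD i []
      = acc.getD i [] ++ (l.filter (fun e => f e == (i : Int))).map g := by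
  induction l generalizing acc with
  | nil => simp
  | cons e l ih =>
    obtain ⟨h0, h1⟩ := hf e (List.mem_cons_self)
    have hnot : ¬ f e < 0 := by omega
    have hacc' : pyAppendAt acc (f e) (g e)
        = acc.set (f e).toNat (acc.getD (f e).toNat [] ++ [g e]) := by
      simp only [pyAppendAt, hnot, if_false]
      rw [if_pos ⟨h0, h1⟩]
    rw [List.foldl_cons, ih _ (by
      intro e' he'
      rw [length_pyAppendAt]
      exact hf e' (List.mem_cons_of_mem _ he'))]
    rw [hacc']
    by_cases hi : f e = (i : Int)
    · have hti : (f e).toNat = i := by omega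
      rw [List.filter_cons_of_pos (by simp [hi]), List.map_cons]
      rw [List.getD_eq_getElem?_getD, hti, List.getElem?_set_self (by omega),
          List.getD_eq_getElem?_getD]
      simp
    · have hti : (f e).toNat ≠ i := by omega
      rw [List.filter_cons_of_neg (by simp [hi])]
      rw [List.getD_eq_getElem?_getD, List.getElem?_set_ne hti, ← List.getD_eq_getElem?_getD]

lemma sorted_append_singleton {α : Type} (k : α → Int) (l : List α) (x : α) :
    PySem.List.sorted (l ++ [x]) k false
      = PySem.List.insertBy (fun a b => decide (k a < k b)) x (PySem.List.sorted l k false) := by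
  rw [PySem.List.sorted_eq_foldl_insertBy, PySem.List.sorted_eq_foldl_insertBy, List.foldl_append]
  rfl

-- x goes in front when its key is below every key in the target list
lemma insertBy_of_forall_lt {α : Type} (k : α → Int) (x : α) (zs : List α)
    (h : ∀ z ∈ zs, k x < k z) :
    PySem.List.insertBy (fun a b => decide (k a < k b)) x zs = x :: zs := by
  cases zs with
  | nil => rfl
  | cons z zs => simp [PySem.List.insertBy, h z (by simp)]

lemma filter_insertBy {α : Type} (k : α → Int) (p : α → Bool) (x : α)
    (acc : List α) (hs : acc.Pairwise (fun a b => k a ≤ k b)) :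
    (PySem.List.insertBy (fun a b => decide (k a < k b)) x acc).filter p
      = if p x then PySem.List.insertBy (fun a b => decide (k a < k b)) x (acc.filter p)
        else acc.filter p := by
  induction acc with
  | nil => by_cases hp : p x <;> simp [PySem.List.insertBy, hp]
  | cons y ys ih =>
    rcases List.pairwise_cons.1 hs with ⟨hy, hys⟩
    by_cases hk : k x < k y
    · simp only [PySem.List.insertBy, hk, decide_true, if_true]
      by_cases hp : p x
      · rw [List.filter_cons_of_pos hp]
        rw [insertBy_of_forall_lt k x ((y :: ys).filter p)
          (fun z hz => lt_of_lt_of_le hk (by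
            rcases List.mem_filter.1 hz with ⟨hz', _⟩
            rcases List.mem_cons.1 hz' with rfl | hz''
            · exact le_refl _
            · exact hy z hz''))]
        simp [hp]
      · simp [List.filter_cons_of_neg, hp]
    · simp only [PySem.List.insertBy, hk, decide_false, Bool.false_eq_true, if_false]
      by_cases hpy : p y
      · rw [List.filter_cons_of_pos hpy, ih hys, List.filter_cons_of_pos hpy]
        by_cases hp : p x
        · simp only [hp, if_true]
          rw [PySem.List.insertBy]
          simp [hk]
        · simp [hp]
      · rw [List.filter_cons_of_neg hpy, ih hys, List.filter_cons_of_neg hpy]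

-- a stable sort commutes with filter
lemma filter_sorted {α : Type} (k : α → Int) (p : α → Bool) (l : List α) :
    (PySem.List.sorted l k false).filter p = PySem.List.sorted (l.filter p) k false := by
  induction l using List.reverseRecOn with
  | nil => rfl
  | append_singleton l x ih =>
    rw [sorted_append_singleton, List.filter_append,
        filter_insertBy k p x _ (PySem.List.sorted_pairwise l k), ih]
    by_cases hp : p x
    · simp [hp, sorted_append_singleton]
    · simp [hp]

lemma map_insertBy (k : Int → Int) (f : List Int → Int) (x : List Int) (ys : List (List Int)) :
    PySem.List.insertBy (fun a b => decide (k a < k b)) (f x) (ys.map f)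
      = (PySem.List.insertBy (fun a b => decide (k (f a) < k (f b))) x ys).map f := by
  induction ys with
  | nil => rfl
  | cons y ys ih =>
    simp only [List.map_cons, PySem.List.insertBy]
    by_cases h : k (f x) < k (f y) <;> simp [h, ih]

-- a stable sort commutes with map when the key factors through the map
lemma sorted_map (k : Int → Int) (f : List Int → Int) (l : List (List Int)) :
    PySem.List.sorted (l.map f) k false
      = (PySem.List.sorted l (fun a => k (f a)) false).map f := by
  induction l using List.reverseRecOn with
  | nil => rfl
  | append_singleton l x ih =>
    rw [List.map_append, List.map_singleton, sorted_append_singleton k (l.map f) (f x),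
        sorted_append_singleton, ih, map_insertBy]

lemma insertBy_congr (k1 k2 : List Int → Int) (x : List Int) (ys : List (List Int))
    (hx : k1 x = k2 x) (hys : ∀ y ∈ ys, k1 y = k2 y) :
    PySem.List.insertBy (fun a b => decide (k1 a < k1 b)) x ys
      = PySem.List.insertBy (fun a b => decide (k2 a < k2 b)) x ys := by
  induction ys with
  | nil => rfl
  | cons y ys ih =>
    simp only [PySem.List.insertBy, hx, hys y (by simp)]
    split <;> simp_all [ih (fun z hz => hys z (by simp [hz]))]

-- sorting is determined by the key values on the members
lemma sorted_congr (k1 k2 : List Int → Int) (l : List (List Int))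
    (h : ∀ a ∈ l, k1 a = k2 a) :
    PySem.List.sorted l k1 false = PySem.List.sorted l k2 false := by
  induction l using List.reverseRecOn with
  | nil => rfl
  | append_singleton l x ih =>
    rw [sorted_append_singleton, sorted_append_singleton,
        ih (fun a ha => h a (by simp [ha])),
        insertBy_congr k1 k2 x _ (h x (by simp))
          (fun y hy => h y (by simp [(PySem.List.mem_sorted l k2 false y).1 hy]))]

-- ===== VERDICT (by name: the statement is the Claim_ definition above) =====
theorem get_fanin_fanout_spec : Claim_equal_get_fanin_fanout := by
  intro x_data edge_index edge_type _ hpre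
  obtain ⟨-, he⟩ := hpre
  unfold Spec_get_fanin_fanout get_fanin_fanout get_fanin_fanout_alt
  simp only
  rw [PySem.List.foldl_prod_mk
      (f := fun a e => pyAppendAt a (PySem.List.pyGetD e 1 0) (PySem.List.pyGetD e 0 0))
      (g := fun a e => pyAppendAt a (PySem.List.pyGetD e 0 0) (PySem.List.pyGetD e 1 0))]
  refine Prod.ext ?_ rfl
  -- name the shared pieces
  set n := x_data.length with hn
  set etd : PySem.Dict (Int × Int) Int := (PySem.List.pyRange 0 edge_index.length 1).foldl
      (fun d id => d.insert (PySem.List.pyGetD (PySem.List.pyGetD edge_index id []) 0 0,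
                             PySem.List.pyGetD (PySem.List.pyGetD edge_index id []) 1 0)
                            (PySem.List.pyGetD edge_type id 0)) PySem.Dict.empty with hetd
  set gkey : List Int → Int :=
      fun e => etd.getD (PySem.List.pyGetD e 0 0, PySem.List.pyGetD e 1 0) 0 with hgkey
  have hf : ∀ e ∈ edge_index,
      0 ≤ PySem.List.pyGetD e 1 0 ∧
        PySem.List.pyGetD e 1 0 < ((List.replicate n ([] : List Int)).length : Int) := by
    intro e heI
    obtain ⟨-, -, -, h4, h5⟩ := he e heI
    simpa using ⟨h4, h5⟩
  have hF : (edge_index.foldl (fun a e =>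
      pyAppendAt a (PySem.List.pyGetD e 1 0) (PySem.List.pyGetD e 0 0))
      (List.replicate n ([] : List Int))).length = n := by
    rw [length_foldl_pyAppendAt]; simp
  have hSmem : ∀ e ∈ PySem.List.sorted edge_index gkey false,
      0 ≤ PySem.List.pyGetD e 1 0 ∧
        PySem.List.pyGetD e 1 0 < ((List.replicate n ([] : List Int)).length : Int) :=
    fun e heS => hf e ((PySem.List.mem_sorted edge_index gkey false e).1 heS)
  have hS : ((PySem.List.sorted edge_index gkey false).foldl (fun a e =>
      pyAppendAt a (PySem.List.pyGetD e 1 0) (PySem.List.pyGetD e 0 0))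
      (List.replicate n ([] : List Int))).length = n := by
    rw [length_foldl_pyAppendAt]; simp
  apply List.ext_getElem (by simp [hF, hS])
  intro i h1 h2
  rw [List.getElem_map, List.getElem_range]
  have hiN : i < n := by simpa [hF] using h1
  have hrep : (List.replicate n ([] : List Int)).getD i [] = [] := by
    simp [List.getD_eq_getElem?_getD, hiN]
  rw [← List.getD_eq_getElem _ [] h2,
      getD_foldl_pyAppendAt _ _ _ _ hSmem i,
      getD_foldl_pyAppendAt _ _ _ _ hf i, hrep]
  rw [filter_sorted gkey (fun e => PySem.List.pyGetD e 1 0 == (i : Int)) edge_index]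
  rw [List.nil_append, List.nil_append]
  rw [sorted_map (fun x => etd.getD (x, (i : Int)) 0) (fun e => PySem.List.pyGetD e 0 0)]
  congr 1
  apply sorted_congr
  intro e heMem
  obtain ⟨-, hei⟩ := List.mem_filter.1 heMem
  have : PySem.List.pyGetD e 1 0 = (i : Int) := by simpa using hei
  simp [hgkey, this]
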